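-- pv_equiv track=rewrite | github.com/multivac61/aoc | year/2017.py | find_longest_bridge
-- ===== SOURCE A (Python) =====
-- def find_longest_bridge(components, current_port=0, used=None):
--     """Find the longest bridge (and its strength)."""
--     if used is None:
--         used = set()
--
--     max_length = 0
--     max_strength = 0
--
--     for i, (port1, port2) in enumerate(components):
--         if i in used:
--             continue
--
--         if port1 == current_port:
--             next_port = port2
--         elif port2 == current_port:
--             next_port = port1
--         else:
--             continue
--
--         new_used = used | {i}
--         length, strength = find_longest_bridge(components, next_port, new_used)
--         length += 1
--         strength += port1 + port2
--
--         if length > max_length or (length == max_length and strength > max_strength):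
--             max_length = length
--             max_strength = strength
--
--     return max_length, max_strength
-- ===== SOURCE B (Python) =====
-- def _best(avail, port):
--     """Best (length, strength) over bridges built from the remaining components."""
--     best = (0, 0)
--     for j, (p1, p2) in enumerate(avail):
--         if p1 == port:
--             nxt = p2
--         elif p2 == port:
--             nxt = p1
--         else:
--             continue
--         l, s = _best(avail[:j] + avail[j + 1:], nxt)
--         cand = (l + 1, s + p1 + p2)
--         if cand > best:
--             best = cand
--     return best
--
--
-- def find_longest_bridge(components, current_port=0, used=None):
--     """Find the longest bridge (and its strength)."""
--     if used is None:
--         used = set()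
--     avail = [c for i, c in enumerate(components) if i not in used]
--     return _best(avail, current_port)
-- ===== Notes on version B (the rewrite author's own statement) =====
-- stated objective: alternative
-- what changed: The recursion no longer threads the full component list plus a growing used-index set: B filters the used components out once, then recurses on a materialized shrinking list (avail[:j]+avail[j+1:]) with idiomatic tuple comparison for the lexicographic best, so no index bookkeeping or used-membership test appears in the search.
import Mathlib
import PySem

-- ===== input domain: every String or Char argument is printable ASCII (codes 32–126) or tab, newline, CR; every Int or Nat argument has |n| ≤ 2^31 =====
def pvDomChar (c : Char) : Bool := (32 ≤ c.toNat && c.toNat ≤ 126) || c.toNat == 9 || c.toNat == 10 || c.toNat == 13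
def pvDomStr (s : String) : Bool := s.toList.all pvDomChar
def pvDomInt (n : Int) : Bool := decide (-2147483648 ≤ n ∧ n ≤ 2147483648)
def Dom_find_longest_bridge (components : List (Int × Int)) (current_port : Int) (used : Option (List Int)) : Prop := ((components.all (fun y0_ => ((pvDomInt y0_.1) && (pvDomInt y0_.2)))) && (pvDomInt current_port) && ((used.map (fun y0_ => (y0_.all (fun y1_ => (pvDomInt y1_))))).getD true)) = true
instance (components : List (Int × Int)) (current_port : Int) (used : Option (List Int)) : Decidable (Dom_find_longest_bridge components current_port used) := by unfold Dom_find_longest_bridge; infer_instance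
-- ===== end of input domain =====

-- B replaces A's (full list + growing used-index set) recursion by a one-time filter followed by
-- recursion on a materialized shrinking list of the remaining components (objective: alternative).


-- ===== PORT A =====
-- fuel is a totality guard only: each recursive call adds a fresh in-range index to `used`,
-- so the recursion depth never exceeds components.length and the fuel-0 branch is unreachable.
def flbGoA (components : List (Int × Int)) (fuel : Nat) (current_port : Int) (used : List Int) : Int × Int :=
  match fuel with
  | 0 => (0, 0)
  | fuel + 1 =>
    (PySem.List.enumerate components 0).foldl (fun acc ic =>
      if PySem.Set.contains used ic.1 then acc            -- if i in used: continue
      else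
        match (if ic.2.1 = current_port then some ic.2.2
               else if ic.2.2 = current_port then some ic.2.1
               else none) with                             -- the if/elif/else(continue) chain
        | none => acc
        | some next_port =>
          let r := flbGoA components fuel next_port (PySem.Set.union used [ic.1])  -- used | {i}
          let length := r.1 + 1
          let strength := r.2 + ic.2.1 + ic.2.2
          if length > acc.1 ∨ (length = acc.1 ∧ strength > acc.2) then (length, strength) else acc)
      (0, 0)

def find_longest_bridge (components : List (Int × Int)) (current_port : Int) (used : Option (List Int)) : Int × Int :=
  flbGoA components (components.length + 1) current_port (match used with | none => [] | some u => u)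

-- ===== PORT B =====
-- fuel is a totality guard only: every recursive call is on a list one shorter.
def flbGoB (fuel : Nat) (avail : List (Int × Int)) (port : Int) : Int × Int :=
  match fuel with
  | 0 => (0, 0)
  | fuel + 1 =>
    (PySem.List.enumerate avail 0).foldl (fun best jc =>
      match (if jc.2.1 = port then some jc.2.2
             else if jc.2.2 = port then some jc.2.1
             else none) with
      | none => best
      | some nxt =>
        let rest := PySem.List.slice avail none (some jc.1) ++ PySem.List.slice avail (some (jc.1 + 1)) none  -- avail[:j] + avail[j+1:]
        let r := flbGoB fuel rest nxt
        let cand := (r.1 + 1, r.2 + jc.2.1 + jc.2.2)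
        if cand.1 > best.1 ∨ (cand.1 = best.1 ∧ cand.2 > best.2) then cand else best)  -- cand > best (tuple lex)
      (0, 0)

def find_longest_bridge_alt (components : List (Int × Int)) (current_port : Int) (used : Option (List Int)) : Int × Int :=
  let usedL : List Int := match used with | none => [] | some u => u
  let avail := ((PySem.List.enumerate components 0).filter
      (fun ic => !(PySem.Set.contains usedL ic.1))).map (fun ic => ic.2)
  flbGoB (components.length + 1) avail current_port

-- ===== PRECONDITION & SPEC =====
def Spec_find_longest_bridge (components : List (Int × Int)) (current_port : Int) (used : Option (List Int)) (out : Int × Int) : Prop := out = find_longest_bridge_alt components current_port used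
instance (components : List (Int × Int)) (current_port : Int) (used : Option (List Int)) (out : Int × Int) : Decidable (Spec_find_longest_bridge components current_port used out) := by unfold Spec_find_longest_bridge; infer_instance

-- ===== CLAIM (what is proved, stated in full; the proofs are below) =====
def Claim_equal_find_longest_bridge : Prop := ∀ (components : List (Int × Int)) (current_port : Int) (used : Option (List Int)), Dom_find_longest_bridge components current_port used → Spec_find_longest_bridge components current_port used (find_longest_bridge components current_port used)

-- ===== LEMMAS AND PROOFS =====

-- the (index, component) pairs A still considers under `used`
def pvAvailP (components : List (Int × Int)) (used : List Int) : List (Int × (Int × Int)) :=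
  (PySem.List.enumerate components 0).filter (fun ic => !(PySem.Set.contains used ic.1))

theorem pvAvailP_pairwise (components : List (Int × Int)) (used : List Int) :
    (pvAvailP components used).Pairwise (fun p q => p.1 < q.1) := by
  exact (PySem.List.pairwise_lt_enumerate components 0).sublist List.filter_sublist

-- filtering out the first component of the j-th element of an index-increasing list erases exactly it
theorem pvFilter_ne_eraseIdx {α : Type} (L : List (Int × α)) (j : Nat) (hj : j < L.length)
    (hp : L.Pairwise (fun p q => p.1 < q.1)) :
    L.filter (fun x => !(x.1 == L[j].1)) = L.eraseIdx j := by
  induction L generalizing j with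
  | nil => simp at hj
  | cons a t ih =>
    have ha : ∀ x ∈ t, a.1 < x.1 := fun x hx => List.rel_of_pairwise_cons hp hx
    have hp' : t.Pairwise (fun p q => p.1 < q.1) := hp.of_cons
    cases j with
    | zero =>
      simp only [List.getElem_cons_zero, List.eraseIdx_cons_zero, List.filter_cons,
        beq_self_eq_true, Bool.not_true]
      simp only [Bool.false_eq_true, if_false]
      apply List.filter_eq_self.2
      intro x hx
      have := ha x hx
      simp only [Bool.not_eq_true', beq_eq_false_iff_ne]
      omega
    | succ j =>
      simp only [List.getElem_cons_succ, List.eraseIdx_cons_succ, List.filter_cons]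
      have hj' : j < t.length := by simpa using hj
      have hne : (!(a.1 == t[j].1)) = true := by
        have := ha t[j] (t.getElem_mem hj')
        simp only [Bool.not_eq_true', beq_eq_false_iff_ne]; omega
      rw [if_pos hne, ih j hj' hp']

-- 'continue' on a boolean test: folding with a skip-branch is folding over the filtered list
theorem pvSkip {α β : Type} (l : List α) (p : α → Bool) (f : β → α → β) (init : β) :
    l.foldl (fun acc x => if p x then acc else f acc x) init
      = (l.filter (fun x => !(p x))).foldl f init := by
  induction l generalizing init with
  | nil => rfl
  | cons a t ih => by_cases h : p a <;> simp [h, ih]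

-- adding an element absent from the set appends it
theorem pvUnion (used : List Int) (i : Int) (h : PySem.Set.contains used i = false) :
    PySem.Set.union used [i] = used ++ [i] := by
  have hmem : i ∉ used := by
    intro hm
    rw [(PySem.Set.contains_iff used i).2 hm] at h
    cases h
  show PySem.Set.add used i = used ++ [i]
  exact PySem.Set.add_of_not_mem hmem

theorem pvContainsApp (used : List Int) (i x : Int) :
    PySem.Set.contains (used ++ [i]) x = (PySem.Set.contains used x || (x == i)) := by
  rw [Bool.eq_iff_iff]
  simp

-- enlarging `used` by one element filters one more component out
theorem pvAvail_append (components : List (Int × Int)) (used : List Int) (i : Int) :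
    pvAvailP components (used ++ [i])
      = (pvAvailP components used).filter (fun x => !(x.1 == i)) := by
  unfold pvAvailP
  rw [List.filter_filter]
  apply List.filter_congr
  intro a _
  rw [pvContainsApp]
  cases PySem.Set.contains used a.1 <;> cases (a.1 == i) <;> rfl

-- marking the k-th remaining component used = deleting it from the remaining list
theorem pvRest (components : List (Int × Int)) (used : List Int) (k : Nat)
    (hk : k < (pvAvailP components used).length) :
    (pvAvailP components (used ++ [((pvAvailP components used)[k]).1])).map (fun ic => ic.2)
      = (((pvAvailP components used).map (fun ic => ic.2)).take k
          ++ ((pvAvailP components used).map (fun ic => ic.2)).drop (k + 1)) := by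
  rw [pvAvail_append, pvFilter_ne_eraseIdx _ k hk (pvAvailP_pairwise components used),
    ← List.eraseIdx_map, List.eraseIdx_eq_take_drop_succ]

-- position-indexed correspondence of the two loops
theorem pvFoldPos {γ : Type} (L : List (Int × (Int × Int))) (B : List (Int × Int))
    (hB : B = L.map (fun ic => ic.2))
    (fA : γ → (Int × (Int × Int)) → γ) (fB : γ → (Int × (Int × Int)) → γ)
    (hstep : ∀ (k : Nat) (hk : k < L.length) (acc : γ), fA acc L[k] = fB acc ((k : Int), (L[k]).2)) :
    ∀ (m k : Nat) (acc : γ), L.length ≤ k + m →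
      (L.drop k).foldl fA acc = ((PySem.List.enumerate B 0).drop k).foldl fB acc := by
  have hlen : (PySem.List.enumerate B 0).length = L.length := by
    rw [PySem.List.length_enumerate, hB, List.length_map]
  intro m
  induction m with
  | zero =>
    intro k acc h
    rw [List.drop_eq_nil_of_le (by omega), List.drop_eq_nil_of_le (by rw [hlen]; omega)]
    rfl
  | succ m ihm =>
    intro k acc h
    by_cases hk : k < L.length
    · rw [List.drop_eq_getElem_cons hk, List.drop_eq_getElem_cons (show k < (PySem.List.enumerate B 0).length by rw [hlen]; omega)]
      simp only [List.foldl_cons]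
      have he : (PySem.List.enumerate B 0)[k]'(by rw [hlen]; omega) = ((k : Int), (L[k]).2) := by
        rw [PySem.List.getElem_enumerate]
        subst hB
        simp
      rw [he, ← hstep k hk acc]
      exact ihm (k + 1) _ (by omega)
    · rw [List.drop_eq_nil_of_le (by omega), List.drop_eq_nil_of_le (by rw [hlen]; omega)]
      rfl

-- the central fuel-indexed equivalence: A's search over (components, used) equals
-- B's search over the materialized remaining list
theorem pvMain (components : List (Int × Int)) : ∀ (fuel : Nat) (used : List Int) (port : Int),
    flbGoA components fuel port used = flbGoB fuel ((pvAvailP components used).map (fun ic => ic.2)) port := by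
  intro fuel
  induction fuel with
  | zero => intro used port; rfl
  | succ fuel ih =>
    intro used port
    show (PySem.List.enumerate components 0).foldl (fun acc ic =>
        if PySem.Set.contains used ic.1 then acc
        else
          match (if ic.2.1 = port then some ic.2.2
                 else if ic.2.2 = port then some ic.2.1
                 else none) with
          | none => acc
          | some next_port =>
            let r := flbGoA components fuel next_port (PySem.Set.union used [ic.1])
            let length := r.1 + 1
            let strength := r.2 + ic.2.1 + ic.2.2
            if length > acc.1 ∨ (length = acc.1 ∧ strength > acc.2) then (length, strength) else acc)
        (0, 0)
      = (PySem.List.enumerate ((pvAvailP components used).map (fun ic => ic.2)) 0).foldl (fun best jc =>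
          match (if jc.2.1 = port then some jc.2.2
                 else if jc.2.2 = port then some jc.2.1
                 else none) with
          | none => best
          | some nxt =>
            let rest := PySem.List.slice ((pvAvailP components used).map (fun ic => ic.2)) none (some jc.1)
              ++ PySem.List.slice ((pvAvailP components used).map (fun ic => ic.2)) (some (jc.1 + 1)) none
            let r := flbGoB fuel rest nxt
            let cand := (r.1 + 1, r.2 + jc.2.1 + jc.2.2)
            if cand.1 > best.1 ∨ (cand.1 = best.1 ∧ cand.2 > best.2) then cand else best)
          (0, 0)
    rw [pvSkip]
    have hfold := pvFoldPos (γ := Int × Int) (pvAvailP components used)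
      ((pvAvailP components used).map (fun ic => ic.2)) rfl
      (fun acc ic =>
        match (if ic.2.1 = port then some ic.2.2
               else if ic.2.2 = port then some ic.2.1
               else none) with
        | none => acc
        | some next_port =>
          let r := flbGoA components fuel next_port (PySem.Set.union used [ic.1])
          let length := r.1 + 1
          let strength := r.2 + ic.2.1 + ic.2.2
          if length > acc.1 ∨ (length = acc.1 ∧ strength > acc.2) then (length, strength) else acc)
      (fun best jc =>
        match (if jc.2.1 = port then some jc.2.2
               else if jc.2.2 = port then some jc.2.1
               else none) with
        | none => best
        | some nxt =>
          let rest := PySem.List.slice ((pvAvailP components used).map (fun ic => ic.2)) none (some jc.1)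
            ++ PySem.List.slice ((pvAvailP components used).map (fun ic => ic.2)) (some (jc.1 + 1)) none
          let r := flbGoB fuel rest nxt
          let cand := (r.1 + 1, r.2 + jc.2.1 + jc.2.2)
          if cand.1 > best.1 ∨ (cand.1 = best.1 ∧ cand.2 > best.2) then cand else best)
      ?_ (pvAvailP components used).length 0 (0, 0) (by omega)
    · rw [List.drop_zero, List.drop_zero] at hfold
      exact hfold
    · -- the per-element step equality
      intro k hk acc
      have hmem : (pvAvailP components used)[k] ∈ pvAvailP components used := List.getElem_mem hk
      have hcont : PySem.Set.contains used ((pvAvailP components used)[k]).1 = false := by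
        have := List.of_mem_filter hmem
        simpa using this
      simp only
      cases hnp : (if ((pvAvailP components used)[k]).2.1 = port
          then some ((pvAvailP components used)[k]).2.2
          else if ((pvAvailP components used)[k]).2.2 = port
          then some ((pvAvailP components used)[k]).2.1
          else none) with
      | none => rfl
      | some nxt =>
        simp only
        have hslice1 : PySem.List.slice ((pvAvailP components used).map (fun ic => ic.2)) none (some (k : Int))
            = ((pvAvailP components used).map (fun ic => ic.2)).take k :=
          PySem.List.slice_to_natCast _ _
        have hslice2 : PySem.List.slice ((pvAvailP components used).map (fun ic => ic.2)) (some ((k : Int) + 1)) none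
            = ((pvAvailP components used).map (fun ic => ic.2)).drop (k + 1) := by
          have : ((k : Int) + 1) = ((k + 1 : Nat) : Int) := by push_cast; ring
          rw [this]
          exact PySem.List.slice_from_natCast _ _
        rw [hslice1, hslice2, pvUnion used _ hcont, ih, pvRest components used k hk]

-- ===== VERDICT (by name: the statement is the Claim_ definition above) =====
theorem find_longest_bridge_spec : Claim_equal_find_longest_bridge := by
  intro components current_port used _
  unfold Spec_find_longest_bridge find_longest_bridge find_longest_bridge_alt
  exact pvMain components (components.length + 1) _ current_port
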